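-- pv_equiv track=rewrite | github.com/HayeonLee88/BaekJoon | 프로그래머스/4/17685. ［3차］ 자동완성/［3차］ 자동완성.py | solution
-- ===== SOURCE A (Python) =====
-- def solution(words):
--     answer = 0
--     def count_same_word(w1, w2):
--         cnt = 0
--         for s1, s2 in zip(w1, w2):
--             if s1 == s2:
--                 cnt += 1
--             else:
--                 break
--         return cnt
--     words.sort()
--     for i in range(len(words)):
--         prev = 0
--         nxt = 0
--         if i > 0:
--             prev = count_same_word(words[i - 1], words[i])
--         if i < len(words) - 1:
--             nxt = count_same_word(words[i], words[i + 1])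
--         needed = max(prev, nxt) + 1
--         answer += min(len(words[i]), needed)
--     return answer
-- ===== SOURCE B (Python) =====
-- def solution(words):
--     # For each word, chars typed = min(len(w), 1 + longest common prefix with any OTHER word).
--     # Direct pairwise scan; no sorting (and unlike A, words is not mutated).
--     total = 0
--     for i in range(len(words)):
--         w = words[i]
--         m = 0
--         for j in range(len(words)):
--             if j != i:
--                 v = words[j]
--                 k = 0
--                 while k < len(w) and k < len(v) and w[k] == v[k]:
--                     k += 1
--                 if k > m:
--                     m = k
--         total += min(len(w), m + 1)
--     return total
-- ===== Notes on version B (the rewrite author's own statement) =====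
-- stated objective: alternative
-- what changed: A sorts the list and takes the longest common prefix with the two sorted neighbours; B does no sorting and computes, for each word, the maximum common prefix over all other words by a direct pairwise scan (and does not mutate the input list).
import Mathlib
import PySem

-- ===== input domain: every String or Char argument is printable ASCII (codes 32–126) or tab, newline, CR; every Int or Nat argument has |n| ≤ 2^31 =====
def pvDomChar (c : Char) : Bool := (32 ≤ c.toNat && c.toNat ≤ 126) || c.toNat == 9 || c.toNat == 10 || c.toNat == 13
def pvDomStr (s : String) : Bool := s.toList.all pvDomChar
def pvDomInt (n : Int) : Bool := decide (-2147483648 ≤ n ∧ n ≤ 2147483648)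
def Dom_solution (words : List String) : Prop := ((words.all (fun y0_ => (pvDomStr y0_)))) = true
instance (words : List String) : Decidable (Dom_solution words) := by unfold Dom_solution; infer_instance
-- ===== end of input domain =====

-- B replaces A's sort-and-compare-with-neighbours by a direct pairwise maximum-common-prefix scan
-- (alternative algorithm, no sorting). A sorts `words` in place; B does not mutate it — the
-- equivalence proved here is about the RETURN value only.

-- ===== PORT A =====
-- 'for s1, s2 in zip(w1, w2): if s1 == s2: cnt += 1 else: break' — hand-ported, exact: the break
-- stops at the first unequal pair, which the structural recursion mirrors.
def pvCountSame : List (Char × Char) → Int → Int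
  | [], cnt => cnt
  | (s1, s2) :: rest, cnt => if s1 = s2 then pvCountSame rest (cnt + 1) else cnt

def pvCountSameWord (w1 w2 : String) : Int := pvCountSame (w1.toList.zip w2.toList) 0

def solution (words : List String) : Int :=
  let ws := PySem.List.sorted words (fun w => w) false
  (PySem.List.pyRange 0 (PySem.List.len ws) 1).foldl (fun answer i =>
    let prev : Int := if i > 0 then pvCountSameWord (PySem.List.pyGetD ws (i - 1) "") (PySem.List.pyGetD ws i "") else 0
    let nxt : Int := if i < PySem.List.len ws - 1 then pvCountSameWord (PySem.List.pyGetD ws i "") (PySem.List.pyGetD ws (i + 1) "") else 0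
    let needed := max prev nxt + 1
    answer + min (PySem.Str.len (PySem.List.pyGetD ws i "")) needed) 0

-- ===== PORT B =====
-- 'k = 0; while k < len(w) and k < len(v) and w[k] == v[k]: k += 1' — hand-ported, exact: the
-- while loop walks both strings in step and stops at the end of either or at the first mismatch.
def pvLcpLoop : List Char → List Char → Int
  | a :: as, b :: bs => if a = b then pvLcpLoop as bs + 1 else 0
  | _, _ => 0

def solution_alt (words : List String) : Int :=
  (PySem.List.pyRange 0 (PySem.List.len words) 1).foldl (fun total i =>
    let w := PySem.List.pyGetD words i ""
    let m : Int := (PySem.List.pyRange 0 (PySem.List.len words) 1).foldl (fun m j =>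
      if j ≠ i then
        let v := PySem.List.pyGetD words j ""
        let k := pvLcpLoop w.toList v.toList
        if k > m then k else m
      else m) 0
    total + min (PySem.Str.len w) (m + 1)) 0

-- ===== PRECONDITION & SPEC =====
def Spec_solution (words : List String) (out : Int) : Prop := out = solution_alt words
instance (words : List String) (out : Int) : Decidable (Spec_solution words out) := by unfold Spec_solution; infer_instance

-- ===== CLAIM (what is proved, stated in full; the proofs are below) =====
def Claim_equal_solution : Prop := ∀ (words : List String), Dom_solution words → Spec_solution words (solution words)


-- proof-side abbreviations (used only below)
def pvLcp (w v : String) : Int := pvLcpLoop w.toList v.toList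
def pvMaxL (w : String) (l : List String) : Int := l.foldl (fun acc v => max acc (pvLcp w v)) 0
def pvTerm (w : String) (l : List String) : Int := min (PySem.Str.len w) (pvMaxL w l + 1)
def pvSum (l : List String) : Int := ((List.range l.length).map (fun i => pvTerm (l.getD i "") (l.eraseIdx i))).sum

-- ===== LEMMAS AND PROOFS =====

-- Basic facts about the common-prefix length
theorem pvLcpLoop_nil (b : List Char) : pvLcpLoop [] b = 0 := by cases b <;> rfl
theorem pvLcpLoop_nil_right (a : List Char) : pvLcpLoop a [] = 0 := by cases a <;> rfl
theorem pvLcpLoop_cons_eq (a : Char) (x y : List Char) : pvLcpLoop (a::x) (a::y) = pvLcpLoop x y + 1 := by simp [pvLcpLoop]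
theorem pvLcpLoop_cons_ne {a b : Char} (x y : List Char) (h : a ≠ b) : pvLcpLoop (a::x) (b::y) = 0 := by simp [pvLcpLoop, h]

theorem pvLcp_nonneg (a b : List Char) : 0 ≤ pvLcpLoop a b := by
  induction a generalizing b with
  | nil => simp [pvLcpLoop]
  | cons x xs ih =>
    cases b with
    | nil => simp [pvLcpLoop]
    | cons y ys =>
      by_cases h : x = y
      · simp only [pvLcpLoop, if_pos h]; have := ih ys; omega
      · simp [pvLcpLoop, h]

theorem pvLcp_comm (a b : List Char) : pvLcpLoop a b = pvLcpLoop b a := by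
  induction a generalizing b with
  | nil => cases b <;> simp [pvLcpLoop]
  | cons x xs ih =>
    cases b with
    | nil => simp [pvLcpLoop]
    | cons y ys =>
      by_cases h : x = y
      · subst h; simp only [pvLcpLoop, ih]
      · simp [pvLcpLoop, h, Ne.symm h]

theorem pvCountSame_eq (a b : List Char) (c : Int) :
    pvCountSame (a.zip b) c = c + pvLcpLoop a b := by
  induction a generalizing b c with
  | nil => simp [pvCountSame, pvLcpLoop]
  | cons x xs ih =>
    cases b with
    | nil => simp [pvCountSame, pvLcpLoop]
    | cons y ys =>
      by_cases h : x = y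
      · simp only [List.zip_cons_cons, pvCountSame, pvLcpLoop, if_pos h, ih]; ring
      · simp [pvCountSame, pvLcpLoop, h]

theorem pvCountSameWord_eq (w v : String) : pvCountSameWord w v = pvLcp w v := by
  simp [pvCountSameWord, pvLcp, pvCountSame_eq]

-- Lexicographic order vs. common prefixes
theorem pv_cons_le_head (x y : Char) (xs ys : List Char) (h : x :: xs ≤ y :: ys) : x ≤ y := by
  rcases le_iff_lt_or_eq.mp h with h | h
  · have h2 : List.Lex (· < ·) (x::xs) (y::ys) := h
    cases h2 with
    | cons _ => exact le_rfl
    | rel hr => exact le_of_lt hr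
  · cases h; exact le_rfl

theorem pv_cons_le_tail (x : Char) (xs ys : List Char) (h : x :: xs ≤ x :: ys) : xs ≤ ys := by
  rcases le_iff_lt_or_eq.mp h with h | h
  · have h2 : List.Lex (· < ·) (x::xs) (x::ys) := h
    cases h2 with
    | cons h3 => exact le_of_lt h3
    | rel hr => exact absurd hr (lt_irrefl x)
  · cases h; exact le_rfl

theorem pv_not_cons_le_nil (x : Char) (xs : List Char) : ¬ (x :: xs ≤ ([] : List Char)) := by
  intro h
  exact absurd (List.Lex.nil : List.Lex (· < ·) ([] : List Char) (x :: xs)) (not_lt.mpr h)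

-- for la ≤ lb ≤ lc the common prefix of the outer pair is at most either inner one
theorem pvLcp_between (la lb lc : List Char) (h1 : la ≤ lb) (h2 : lb ≤ lc) :
    pvLcpLoop la lc ≤ pvLcpLoop la lb ∧ pvLcpLoop la lc ≤ pvLcpLoop lb lc := by
  induction la generalizing lb lc with
  | nil =>
    exact ⟨by rw [pvLcpLoop_nil, pvLcpLoop_nil], by rw [pvLcpLoop_nil]; exact pvLcp_nonneg _ _⟩
  | cons a la' ih =>
    cases lc with
    | nil =>
      rw [pvLcpLoop_nil_right]
      exact ⟨pvLcp_nonneg _ _, pvLcp_nonneg _ _⟩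
    | cons c lc' =>
      by_cases hac : a = c
      · subst hac
        cases lb with
        | nil => exact absurd h1 (pv_not_cons_le_nil a la')
        | cons b lb' =>
          have hab : a ≤ b := pv_cons_le_head _ _ _ _ h1
          have hba : b ≤ a := pv_cons_le_head _ _ _ _ h2
          have hb : b = a := le_antisymm hba hab
          subst hb
          have t1 : la' ≤ lb' := pv_cons_le_tail _ _ _ h1
          have t2 : lb' ≤ lc' := pv_cons_le_tail _ _ _ h2
          have := ih lb' lc' t1 t2
          rw [pvLcpLoop_cons_eq, pvLcpLoop_cons_eq, pvLcpLoop_cons_eq]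
          omega
      · rw [pvLcpLoop_cons_ne _ _ hac]
        exact ⟨pvLcp_nonneg _ _, pvLcp_nonneg _ _⟩

-- running-max helpers over lists of strings
theorem pv_foldl_max_le (l : List String) (f : String → Int) (B : Int) :
    ∀ init, init ≤ B → (∀ v ∈ l, f v ≤ B) →
    l.foldl (fun acc v => max acc (f v)) init ≤ B := by
  induction l with
  | nil => intro init h0 _; exact h0
  | cons x xs ih =>
    intro init h0 hb
    simp only [List.foldl_cons]
    exact ih _ (max_le h0 (hb x List.mem_cons_self)) (fun v hv => hb v (List.mem_cons_of_mem x hv))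

theorem pv_foldl_max_init (l : List String) (f : String → Int) (a b : Int) :
    l.foldl (fun acc v => max acc (f v)) (max a b) = max a (l.foldl (fun acc v => max acc (f v)) b) := by
  induction l generalizing b with
  | nil => rfl
  | cons x xs ih => simp only [List.foldl_cons, max_assoc, ih]

theorem pvMaxL_nonneg (w : String) (l : List String) : 0 ≤ pvMaxL w l := by
  exact (PySem.List.le_foldl_max_int l (fun v => pvLcp w v) 0).1

theorem pv_foldl_max_eval (l : List String) (f : String → Int) (x : String)
    (hx : x ∈ l) (hb : ∀ v ∈ l, f v ≤ f x) (h0 : 0 ≤ f x) :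
    l.foldl (fun acc v => max acc (f v)) 0 = f x := by
  refine le_antisymm (pv_foldl_max_le l f (f x) 0 h0 hb) ?_
  exact (PySem.List.le_foldl_max_int l f 0).2 x hx

theorem pvMaxL_append (w : String) (l1 l2 : List String) :
    pvMaxL w (l1 ++ l2) = max (pvMaxL w l1) (pvMaxL w l2) := by
  unfold pvMaxL
  rw [List.foldl_append]
  have h : pvMaxL w l1 = max (pvMaxL w l1) 0 := (max_eq_left (pvMaxL_nonneg w l1)).symm
  calc l2.foldl (fun acc v => max acc (pvLcp w v)) (l1.foldl (fun acc v => max acc (pvLcp w v)) 0)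
      = l2.foldl (fun acc v => max acc (pvLcp w v)) (max (pvMaxL w l1) 0) := by rw [← h]; rfl
    _ = max (pvMaxL w l1) (l2.foldl (fun acc v => max acc (pvLcp w v)) 0) := pv_foldl_max_init _ _ _ _
    _ = max (pvMaxL w l1) (pvMaxL w l2) := rfl

theorem pvMaxL_perm (w : String) {l l' : List String} (h : l.Perm l') : pvMaxL w l = pvMaxL w l' := by
  unfold pvMaxL
  haveI : RightCommutative (fun (acc : Int) (v : String) => max acc (pvLcp w v)) :=
    ⟨fun b a1 a2 => by simp [max_assoc, max_comm (pvLcp w a1)]⟩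
  exact h.foldl_eq 0

theorem pv_range_map_getD (l : List String) (d : String) :
    (List.range l.length).map (fun i => l.getD i d) = l := by
  apply List.ext_getElem
  · simp
  · intro i h1 h2
    simp only [List.getElem_map, List.getElem_range]
    exact l.getD_eq_getElem d (by simpa using h2)

theorem pv_eraseIdx_perm (l : List String) (i : Nat) (h : i < l.length) :
    (l.eraseIdx i).Perm (l.erase l[i]) := by
  have h1 : l.Perm (l[i] :: l.eraseIdx i) := (List.getElem_cons_eraseIdx_perm h).symm
  have h2 : l.Perm (l[i] :: l.erase l[i]) := List.perm_cons_erase (List.getElem_mem h)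
  exact (h1.symm.trans h2).cons_inv

theorem pvSum_eq_map (l : List String) :
    pvSum l = (l.map (fun w => pvTerm w (l.erase w))).sum := by
  unfold pvSum
  have step1 : ∀ i ∈ List.range l.length,
      pvTerm (l.getD i "") (l.eraseIdx i) = pvTerm (l.getD i "") (l.erase (l.getD i "")) := by
    intro i hi
    have hil : i < l.length := List.mem_range.mp hi
    have hg : l.getD i "" = l[i] := l.getD_eq_getElem "" hil
    rw [hg]
    unfold pvTerm
    rw [pvMaxL_perm _ (pv_eraseIdx_perm l i hil)]
  rw [List.map_congr_left step1]
  have h2 : (List.range l.length).map (fun i => pvTerm (l.getD i "") (l.erase (l.getD i "")))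
      = ((List.range l.length).map (fun i => l.getD i "")).map (fun w => pvTerm w (l.erase w)) := by
    rw [List.map_map]; rfl
  rw [h2, pv_range_map_getD]

theorem pvSum_perm {l l' : List String} (h : l.Perm l') : pvSum l = pvSum l' := by
  rw [pvSum_eq_map, pvSum_eq_map]
  have hf : ∀ w ∈ l, pvTerm w (l.erase w) = pvTerm w (l'.erase w) := by
    intro w _
    unfold pvTerm
    rw [pvMaxL_perm _ (h.erase w)]
  rw [List.map_congr_left hf]
  exact ((h.map _).sum_eq)


theorem pv_if_max (m k : Int) : (if k > m then k else m) = max m k := by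
  rcases le_or_gt k m with h | h
  · rw [if_neg (not_lt.mpr h), max_eq_left h]
  · rw [if_pos h, max_eq_right (le_of_lt h)]

theorem pv_inner_eq (l : List String) (w : String) (i : Nat) (hi : i < l.length) :
    (PySem.List.pyRange 0 (PySem.List.len l)).foldl
      (fun m j => if j ≠ (i : Int) then
          (if pvLcpLoop w.toList (PySem.List.pyGetD l j "").toList > m
           then pvLcpLoop w.toList (PySem.List.pyGetD l j "").toList else m)
        else m) 0
    = pvMaxL w (l.eraseIdx i) := by
  rw [PySem.List.len_eq,
      PySem.List.pyRange_one_append 0 (i : Int) (l.length : Int) (Int.natCast_nonneg i)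
        (by exact_mod_cast le_of_lt hi),
      PySem.List.pyRange_one_append (i : Int) ((i : Int) + 1) (l.length : Int) (by omega)
        (by exact_mod_cast hi),
      PySem.List.pyRange_one_singleton, List.foldl_append, List.foldl_append]
  have e1 : ∀ (acc : Int), ∀ j ∈ PySem.List.pyRange 0 (i : Int),
      (if j ≠ (i : Int) then
          (if pvLcpLoop w.toList (PySem.List.pyGetD l j "").toList > acc
           then pvLcpLoop w.toList (PySem.List.pyGetD l j "").toList else acc)
        else acc)
      = max acc (pvLcp w (PySem.List.pyGetD (l.take i) j "")) := by
    intro acc j hj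
    obtain ⟨hj0, hji⟩ := PySem.List.mem_pyRange_one.mp hj
    rw [if_pos (by omega : j ≠ (i : Int)), pv_if_max]
    have hjl : j < (l.length : Int) := by
      have : (i : Int) ≤ (l.length : Int) := by exact_mod_cast le_of_lt hi
      omega
    rw [PySem.List.pyGetD_eq_getElem l "" hj0 hjl,
        PySem.List.pyGetD_eq_getElem (l.take i) "" hj0
          (by rw [List.length_take]; omega)]
    rw [List.getElem_take]
    rfl
  rw [PySem.List.foldl_congr_mem _ _ _ 0 e1]
  have h1 := PySem.List.foldl_pyRange_zero_pyGetD (l.take i) "" (fun acc v => max acc (pvLcp w v)) 0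
  rw [PySem.List.len_eq, List.length_take, Nat.min_eq_left (le_of_lt hi)] at h1
  rw [h1]
  have e2 : ∀ (acc : Int), (if ((i : Int) : Int) ≠ (i : Int) then
          (if pvLcpLoop w.toList (PySem.List.pyGetD l (i : Int) "").toList > acc
           then pvLcpLoop w.toList (PySem.List.pyGetD l (i : Int) "").toList else acc)
        else acc) = acc := by
    intro acc
    rw [if_neg (by omega)]
  rw [List.foldl_cons, List.foldl_nil, e2]
  have e3 : ∀ (acc : Int), ∀ j ∈ PySem.List.pyRange ((i : Int) + 1) (l.length : Int),
      (if j ≠ (i : Int) then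
          (if pvLcpLoop w.toList (PySem.List.pyGetD l j "").toList > acc
           then pvLcpLoop w.toList (PySem.List.pyGetD l j "").toList else acc)
        else acc)
      = max acc (pvLcp w (PySem.List.pyGetD l j "")) := by
    intro acc j hj
    obtain ⟨hj0, hji⟩ := PySem.List.mem_pyRange_one.mp hj
    rw [if_pos (by omega : j ≠ (i : Int)), pv_if_max]
    rfl
  rw [PySem.List.foldl_congr_mem _ _ _ _ e3]
  have h3 := PySem.List.foldl_pyRange_pyGetD l "" (fun acc v => max acc (pvLcp w v))
      (List.foldl (fun acc v => max acc (pvLcp w v)) 0 (List.take i l))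
      (by omega : (0:Int) ≤ (i : Int) + 1)
  rw [PySem.List.len_eq] at h3
  rw [h3]
  have ht : ((i : Int) + 1).toNat = i + 1 := by omega
  rw [ht, List.eraseIdx_eq_take_drop_succ]
  unfold pvMaxL
  rw [List.foldl_append]

theorem pvB_eq (l : List String) : solution_alt l = pvSum l := by
  unfold solution_alt
  rw [PySem.List.len_eq, PySem.List.pyRange_zero_natCast, List.foldl_map]
  rw [PySem.List.foldl_add _ _ 0, zero_add]
  unfold pvSum
  apply congrArg List.sum
  apply List.map_congr_left
  intro i hi
  have hil : i < l.length := List.mem_range.mp hi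
  rw [← PySem.List.pyRange_zero_natCast]
  have h := pv_inner_eq l (PySem.List.pyGetD l (i : Int) "") i hil
  rw [PySem.List.len_eq] at h
  rw [h]
  simp only [PySem.List.pyGetD_natCast]
  rfl


theorem pvLcpS_comm (a b : String) : pvLcp a b = pvLcp b a := pvLcp_comm a.toList b.toList

theorem pvLcpS_nonneg (a b : String) : 0 ≤ pvLcp a b := pvLcp_nonneg a.toList b.toList

theorem pvLcp_between_str (a b c : String) (h1 : a ≤ b) (h2 : b ≤ c) :
    pvLcp a c ≤ pvLcp a b ∧ pvLcp a c ≤ pvLcp b c :=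
  pvLcp_between a.toList b.toList c.toList (String.le_iff_toList_le.mp h1) (String.le_iff_toList_le.mp h2)

theorem pv_take_eval (ws : List String) (i : Nat) (hi : i < ws.length) (h0 : 0 < i)
    (hmono : ∀ (p q : Nat) (hpq : p ≤ q) (hq : q < ws.length), ws[p]'(Nat.lt_of_le_of_lt hpq hq) ≤ ws[q]'hq) :
    pvMaxL (ws[i]'hi) (ws.take i) = pvLcp (ws[i]'hi) (ws[i-1]'(by omega)) := by
  unfold pvMaxL
  refine pv_foldl_max_eval (ws.take i) (fun v => pvLcp (ws[i]'hi) v) (ws[i-1]'(by omega)) ?_ ?_ ?_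
  · have h1 : i - 1 < (ws.take i).length := by rw [List.length_take]; omega
    have h2 : (ws.take i)[i-1]'h1 = ws[i-1]'(by omega) := List.getElem_take
    exact h2 ▸ List.getElem_mem h1
  · intro v hv
    obtain ⟨j, hj, rfl⟩ := List.mem_iff_getElem.mp hv
    have hjlen : j < i := by rw [List.length_take] at hj; omega
    rw [List.getElem_take]
    have ha : ws[j]'(by omega) ≤ ws[i-1]'(by omega) := hmono j (i-1) (by omega) (by omega)
    have hb : ws[i-1]'(by omega) ≤ ws[i]'hi := hmono (i-1) i (by omega) hi
    calc pvLcp (ws[i]'hi) (ws[j]'(by omega)) = pvLcp (ws[j]'(by omega)) (ws[i]'hi) := pvLcpS_comm _ _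
      _ ≤ pvLcp (ws[i-1]'(by omega)) (ws[i]'hi) := (pvLcp_between_str _ _ _ ha hb).2
      _ = pvLcp (ws[i]'hi) (ws[i-1]'(by omega)) := pvLcpS_comm _ _
  · exact pvLcpS_nonneg _ _

theorem pv_drop_eval (ws : List String) (i : Nat) (hi : i < ws.length) (hnext : i + 1 < ws.length)
    (hmono : ∀ (p q : Nat) (hpq : p ≤ q) (hq : q < ws.length), ws[p]'(Nat.lt_of_le_of_lt hpq hq) ≤ ws[q]'hq) :
    pvMaxL (ws[i]'hi) (ws.drop (i+1)) = pvLcp (ws[i]'hi) (ws[i+1]'hnext) := by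
  unfold pvMaxL
  refine pv_foldl_max_eval (ws.drop (i+1)) (fun v => pvLcp (ws[i]'hi) v) (ws[i+1]'hnext) ?_ ?_ ?_
  · have h1 : 0 < (ws.drop (i+1)).length := by rw [List.length_drop]; omega
    have h2 : (ws.drop (i+1))[0]'h1 = ws[i+1]'hnext := by
      rw [List.getElem_drop]
    exact h2 ▸ List.getElem_mem h1
  · intro v hv
    obtain ⟨j, hj, rfl⟩ := List.mem_iff_getElem.mp hv
    have hjlen : i + 1 + j < ws.length := by rw [List.length_drop] at hj; omega
    rw [List.getElem_drop]
    have ha : ws[i]'hi ≤ ws[i+1]'hnext := hmono i (i+1) (by omega) hnext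
    have hb : ws[i+1]'hnext ≤ ws[i+1+j]'hjlen := hmono (i+1) (i+1+j) (by omega) hjlen
    exact (pvLcp_between_str _ _ _ ha hb).1
  · exact pvLcpS_nonneg _ _

theorem pv_termA_eq (ws : List String) (i : Nat) (hil : i < ws.length)
    (hmono : ∀ (p q : Nat) (hpq : p ≤ q) (hq : q < ws.length), ws[p]'(Nat.lt_of_le_of_lt hpq hq) ≤ ws[q]'hq) :
    min (PySem.Str.len (PySem.List.pyGetD ws (i : Int) ""))
      (max (if (i : Int) > 0 then
              pvCountSameWord (PySem.List.pyGetD ws ((i : Int) - 1) "") (PySem.List.pyGetD ws (i : Int) "")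
            else 0)
           (if (i : Int) < (ws.length : Int) - 1 then
              pvCountSameWord (PySem.List.pyGetD ws (i : Int) "") (PySem.List.pyGetD ws ((i : Int) + 1) "")
            else 0) + 1)
    = pvTerm (ws.getD i "") (ws.eraseIdx i) := by
  have hg : ∀ (j : Nat) (hj : j < ws.length), PySem.List.pyGetD ws (j : Int) "" = ws[j]'hj := by
    intro j hj
    rw [PySem.List.pyGetD_natCast]
    exact ws.getD_eq_getElem "" hj
  have hgd : ws.getD i "" = ws[i]'hil := ws.getD_eq_getElem "" hil
  have hprev : (if (i : Int) > 0 then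
      pvCountSameWord (PySem.List.pyGetD ws ((i : Int) - 1) "") (PySem.List.pyGetD ws (i : Int) "") else 0)
      = pvMaxL (ws[i]'hil) (ws.take i) := by
    by_cases h0 : 0 < i
    · rw [if_pos (by exact_mod_cast h0)]
      have hm1 : ((i : Int) - 1) = ((i - 1 : Nat) : Int) := by omega
      rw [hm1, hg (i-1) (by omega), hg i hil, pvCountSameWord_eq,
          pv_take_eval ws i hil h0 hmono, pvLcpS_comm]
    · have hz : i = 0 := by omega
      subst hz
      rw [if_neg (by omega)]
      rfl
  have hnxt : (if (i : Int) < (ws.length : Int) - 1 then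
      pvCountSameWord (PySem.List.pyGetD ws (i : Int) "") (PySem.List.pyGetD ws ((i : Int) + 1) "") else 0)
      = pvMaxL (ws[i]'hil) (ws.drop (i+1)) := by
    by_cases hn : i + 1 < ws.length
    · rw [if_pos (by exact_mod_cast (by omega : (i:Int) < (ws.length : Int) - 1))]
      have hp1 : ((i : Int) + 1) = ((i + 1 : Nat) : Int) := by omega
      rw [hp1, hg (i+1) hn, hg i hil, pvCountSameWord_eq, pv_drop_eval ws i hil hn hmono]
    · rw [if_neg (by omega)]
      rw [List.drop_eq_nil_of_le (by omega : ws.length ≤ i + 1)]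
      rfl
  rw [hprev, hnxt, ← pvMaxL_append, ← List.eraseIdx_eq_take_drop_succ, hg i hil, hgd]
  rfl

set_option maxHeartbeats 1000000 in
theorem pvA_eq (l : List String) :
    solution l = pvSum (PySem.List.sorted l (fun w => w) false) := by
  simp only [solution]
  rw [PySem.List.len_eq, PySem.List.pyRange_zero_natCast, List.foldl_map,
      PySem.List.foldl_add _ _ 0, zero_add]
  unfold pvSum
  apply congrArg List.sum
  apply List.map_congr_left
  intro i hi
  have hil : i < (PySem.List.sorted l (fun w => w) false).length := List.mem_range.mp hi
  have hmono : ∀ (p q : Nat) (hpq : p ≤ q) (hq : q < (PySem.List.sorted l (fun w => w) false).length),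
      (PySem.List.sorted l (fun w => w) false)[p]'(Nat.lt_of_le_of_lt hpq hq)
        ≤ (PySem.List.sorted l (fun w => w) false)[q]'hq := by
    intro p q hpq hq
    exact PySem.List.key_sorted_getElem_mono l (fun w => w) hpq hq
  exact pv_termA_eq _ i hil hmono

theorem solution_spec : Claim_equal_solution := by
  intro words _
  unfold Spec_solution
  rw [pvA_eq, pvB_eq, pvSum_perm (PySem.List.sorted_perm words (fun w => w) false)]
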